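-- pv_equiv track=rewrite | github.com/ZSslience/GenericFramework | GenericFramework/MiddleWare/lib_tpm_common.py | get_value_status
-- ===== SOURCE A (Python) =====
-- def get_value_status(serial_log, key1, key2, key3):
--     result1 = False
--     result2 = False
--     result3 = False
--     lines = serial_log.split('\r\n')
--     for line in lines:
--         if key1 in line:
--             result1 = True
--             break
--     for line in lines:
--         if key2 in line:
--             result2 = True
--             break
--     for line in lines:
--         if key3 in line:
--             result3 = True
--             break
--     result = result1 and result2 and result3
--     return result
-- ===== SOURCE B (Python) =====
-- def get_value_status(serial_log, key1, key2, key3):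
--     keys = [key1, key2, key3]
--     flags = [False, False, False]
--     for line in serial_log.split('\r\n'):
--         flags = [f or (k in line) for f, k in zip(flags, keys)]
--     return all(flags)
-- ===== Notes on version B (the rewrite author's own statement) =====
-- stated objective: simpler
-- what changed: Replaces A's three separate early-breaking scans over the split lines (one flag each) by a single pass that, per line, updates a flag vector for all three keys at once via zip, then returns all(flags).
import Mathlib
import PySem

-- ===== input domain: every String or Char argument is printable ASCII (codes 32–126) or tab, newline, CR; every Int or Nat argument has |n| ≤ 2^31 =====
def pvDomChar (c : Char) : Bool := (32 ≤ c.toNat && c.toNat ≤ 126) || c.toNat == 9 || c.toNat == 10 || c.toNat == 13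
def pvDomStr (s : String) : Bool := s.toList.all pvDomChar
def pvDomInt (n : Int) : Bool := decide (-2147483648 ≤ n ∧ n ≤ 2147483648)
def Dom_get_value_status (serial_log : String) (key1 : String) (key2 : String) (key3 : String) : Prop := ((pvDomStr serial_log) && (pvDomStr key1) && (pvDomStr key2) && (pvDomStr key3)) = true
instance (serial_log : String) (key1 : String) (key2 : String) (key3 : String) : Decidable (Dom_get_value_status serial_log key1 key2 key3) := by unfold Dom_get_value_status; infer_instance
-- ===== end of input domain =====

-- B replaces A's three early-breaking scans over the lines by one pass that updates
-- a flag vector for all three keys per line (objective: simpler, one combined pass).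

-- B replaces A's three early-breaking scans over the lines by one pass that updates
-- a flag vector for all three keys per line (objective: simpler, one combined pass).

-- ===== PORT A =====
-- 'for line in lines: if key in line: result = True; break' with result starting False
def pvScanA (lines : List String) (key : String) : Bool :=
  match lines with
  | [] => false
  | line :: rest => if PySem.Str.isIn key line then true else pvScanA rest key

def get_value_status (serial_log : String) (key1 : String) (key2 : String) (key3 : String) : Bool :=
  let lines := (PySem.Str.split? serial_log "\r\n").getD []   -- sep ≠ "", so split? is always some
  let result1 := pvScanA lines key1
  let result2 := pvScanA lines key2
  let result3 := pvScanA lines key3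
  result1 && result2 && result3

-- ===== PORT B =====
def get_value_status_alt (serial_log : String) (key1 : String) (key2 : String) (key3 : String) : Bool :=
  let keys := [key1, key2, key3]
  let flags := [false, false, false]
  let flags := ((PySem.Str.split? serial_log "\r\n").getD []).foldl
    (fun flags line => List.zipWith (fun f k => f || PySem.Str.isIn k line) flags keys) flags
  flags.all (fun f => f)

-- ===== PRECONDITION & SPEC =====
def Spec_get_value_status (serial_log : String) (key1 : String) (key2 : String) (key3 : String) (out : Bool) : Prop := out = get_value_status_alt serial_log key1 key2 key3
instance (serial_log : String) (key1 : String) (key2 : String) (key3 : String) (out : Bool) : Decidable (Spec_get_value_status serial_log key1 key2 key3 out) := by unfold Spec_get_value_status; infer_instance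

-- ===== CLAIM (what is proved, stated in full; the proofs are below) =====
def Claim_equal_get_value_status : Prop := ∀ (serial_log : String) (key1 : String) (key2 : String) (key3 : String), Dom_get_value_status serial_log key1 key2 key3 → Spec_get_value_status serial_log key1 key2 key3 (get_value_status serial_log key1 key2 key3)

-- ===== LEMMAS AND PROOFS =====
theorem pvZip_id (flags : List Bool) (keys : List String) (h : flags.length ≤ keys.length) :
    List.zipWith (fun (f : Bool) (_ : String) => f) flags keys = flags := by
  induction flags generalizing keys with
  | nil => simp
  | cons f fs ih =>
    cases keys with
    | nil => simp at h
    | cons k ks => simpa using ih ks (by simpa using h)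

theorem pvZip_zip (g h : Bool → String → Bool) (flags : List Bool) (keys : List String) :
    List.zipWith g (List.zipWith h flags keys) keys
      = List.zipWith (fun f k => g (h f k) k) flags keys := by
  induction flags generalizing keys with
  | nil => simp
  | cons f fs ih =>
    cases keys with
    | nil => simp
    | cons k ks => simpa using ih ks

theorem pvZip_absorb (line : String) (rest : List String) :
    ∀ (flags : List Bool) (keys : List String),
    List.zipWith (fun f k => (f || PySem.Str.isIn k line) || pvScanA rest k) flags keys
      = List.zipWith (fun f k => f || pvScanA (line :: rest) k) flags keys := by
  intro flags
  induction flags with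
  | nil => simp
  | cons f fs ih =>
    intro keys
    cases keys with
    | nil => simp
    | cons k ks =>
      simp only [List.zipWith_cons_cons, List.cons.injEq]
      refine ⟨?_, ih ks⟩
      simp only [pvScanA]
      by_cases hk : PySem.Str.isIn k line <;> simp [hk, Bool.or_assoc]

-- Loop invariant for B's fused pass: position-wise it computes
-- 'initial flag || (some line contains that key)', i.e. pvScanA of the whole line list.
theorem pvFoldl_zip (lines : List String) :
    ∀ (flags : List Bool) (keys : List String), flags.length ≤ keys.length →
    lines.foldl (fun flags line => List.zipWith (fun f k => f || PySem.Str.isIn k line) flags keys) flags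
      = List.zipWith (fun f k => f || pvScanA lines k) flags keys := by
  induction lines with
  | nil =>
    intro flags keys h
    simp only [List.foldl_nil, pvScanA, Bool.or_false]
    exact (pvZip_id flags keys h).symm
  | cons line rest ih =>
    intro flags keys h
    simp only [List.foldl_cons]
    rw [ih _ keys (by simp), pvZip_zip]
    exact pvZip_absorb line rest flags keys

-- ===== VERDICT (by name: the statement is the Claim_ definition above) =====
theorem get_value_status_spec : Claim_equal_get_value_status := by
  intro serial_log key1 key2 key3 _
  show get_value_status _ _ _ _ = _
  simp only [get_value_status, get_value_status_alt,
    pvFoldl_zip _ [false, false, false] [key1, key2, key3] (by simp)]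
  simp [Bool.and_assoc]
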